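-- pv_equiv track=rewrite | github.com/hexylena/poem-code | poem.py | alphabetize_codeword
-- ===== SOURCE A (Python) =====
-- def alphabetize_codeword(word):
--     fixed = [None] * len(word)
--     o = 1
--     for i in range(26):
--         k = chr(i + 97)
--         for p, c in enumerate(word):
--             if k == c:
--                 fixed[p] = o
--                 o += 1
--     return fixed
-- ===== SOURCE B (Python) =====
-- def alphabetize_codeword(word):
--     # Counting sort over the 26-letter alphabet: one pass to count letters,
--     # a prefix-sum pass over the 26 counters, one pass assigning ranks.
--     counts = [0] * 26
--     for c in word:
--         ci = ord(c) - 97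
--         if 0 <= ci < 26:
--             counts[ci] += 1
--     nxt = [0] * 26
--     total = 1
--     for i in range(26):
--         nxt[i] = total
--         total += counts[i]
--     fixed = []
--     for c in word:
--         ci = ord(c) - 97
--         if 0 <= ci < 26:
--             fixed.append(nxt[ci])
--             nxt[ci] += 1
--         else:
--             fixed.append(None)
--     return fixed
-- ===== Notes on version B (the rewrite author's own statement) =====
-- stated objective: faster
-- what changed: Replaced the 26 full passes over the word (one per alphabet letter) by a counting sort: one pass counting letters, a prefix sum over the 26 counters, and one pass assigning each position its rank.
import Mathlib
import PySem

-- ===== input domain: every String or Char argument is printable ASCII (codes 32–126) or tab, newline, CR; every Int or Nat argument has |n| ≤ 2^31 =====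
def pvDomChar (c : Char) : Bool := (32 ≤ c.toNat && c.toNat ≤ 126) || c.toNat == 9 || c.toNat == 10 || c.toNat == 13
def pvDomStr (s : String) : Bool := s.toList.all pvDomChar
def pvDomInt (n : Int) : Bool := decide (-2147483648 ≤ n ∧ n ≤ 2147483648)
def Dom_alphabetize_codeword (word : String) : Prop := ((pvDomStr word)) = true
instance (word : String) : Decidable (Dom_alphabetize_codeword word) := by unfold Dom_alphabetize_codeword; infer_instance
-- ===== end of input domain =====

-- B replaces A's 26 full passes over the word (one per alphabet letter) by a counting sort:
-- count letters, prefix-sum the 26 counters, one pass assigning ranks.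

-- ===== PORT A =====
def alphabetize_codeword (word : String) : List (Option Int) :=
  let w := word.toList
  ((PySem.List.pyRange 0 26 1).foldl (fun st i =>
      let k := Char.ofNat (i + 97).toNat
      (PySem.List.enumerate w 0).foldl
        (fun st pc => if k == pc.2 then (st.1.set pc.1.toNat (some st.2), st.2 + 1) else st) st)
    (List.replicate w.length (none : Option Int), (1 : Int))).1

-- ===== PORT B =====
def alphabetize_codeword_alt (word : String) : List (Option Int) :=
  let w := word.toList
  let counts := w.foldl (fun counts c =>
      let ci : Int := (c.toNat : Int) - 97
      if 0 ≤ ci ∧ ci < 26 then counts.set ci.toNat (counts.getD ci.toNat 0 + 1) else counts)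
    (List.replicate 26 (0 : Int))
  let nxt := ((PySem.List.pyRange 0 26 1).foldl (fun st i =>
      (st.1.set i.toNat st.2, st.2 + counts.getD i.toNat 0))
    (List.replicate 26 (0 : Int), (1 : Int))).1
  (w.foldl (fun st c =>
      let ci : Int := (c.toNat : Int) - 97
      if 0 ≤ ci ∧ ci < 26 then
        (st.1.set ci.toNat (st.1.getD ci.toNat 0 + 1), st.2 ++ [some (st.1.getD ci.toNat 0)])
      else (st.1, st.2 ++ [none]))
    (nxt, ([] : List (Option Int)))).2

-- ===== PRECONDITION & SPEC =====
def Spec_alphabetize_codeword (word : String) (out : List (Option Int)) : Prop := out = alphabetize_codeword_alt word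
instance (word : String) (out : List (Option Int)) : Decidable (Spec_alphabetize_codeword word out) := by unfold Spec_alphabetize_codeword; infer_instance

-- ===== CLAIM (what is proved, stated in full; the proofs are below) =====
def Claim_equal_alphabetize_codeword : Prop := ∀ (word : String), Dom_alphabetize_codeword word → Spec_alphabetize_codeword word (alphabetize_codeword word)

-- ===== LEMMAS AND PROOFS =====
theorem pvSet_map_range {α : Type} (g : Nat → α) (n p : Nat) (v : α) :
    ((List.range n).map g).set p v = (List.range n).map (fun q => if q = p then v else g q) := by
  apply List.ext_getElem
  · simp
  · intro i h1 h2
    simp only [List.getElem_set, List.getElem_map, List.getElem_range]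
    by_cases h : i = p
    · simp [h]
    · simp [h]
      intro hpi; exact absurd hpi.symm h
theorem pvMap_range_congr {α : Type} (f g : Nat → α) (n : Nat) (h : ∀ p, p < n → f p = g p) :
    (List.range n).map f = (List.range n).map g :=
  List.map_congr_left (fun x hx => h x (List.mem_range.mp hx))

theorem pvA_inner (k : Char) (r u : List Char) (g : Nat → Option Int) (o : Int) :
    (PySem.List.enumerate r (u.length : Int)).foldl
      (fun st pc => if k == pc.2 then (st.1.set pc.1.toNat (some st.2), st.2 + 1) else st)
      ((List.range (u.length + r.length)).map g, o)
    = ((List.range (u.length + r.length)).map (fun p =>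
         if (u ++ r).getD p ' ' = k ∧ u.length ≤ p then
           some (o + ((r.take (p - u.length)).count k : Int))
         else g p),
       o + (r.count k : Int)) := by
  induction r generalizing u g o with
  | nil =>
    simp only [PySem.List.enumerate_nil, List.foldl_nil, List.length_nil, List.count_nil,
      Nat.cast_zero, add_zero]
    refine Prod.ext ?_ rfl
    apply pvMap_range_congr
    intro p hp
    have hc : ¬ ((u ++ []).getD p ' ' = k ∧ u.length ≤ p) := by
      rintro ⟨-, h2⟩; omega
    exact (if_neg hc).symm
  | cons c r' ih =>
    rw [PySem.List.enumerate_cons, List.foldl_cons]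
    have hN : u.length + (c :: r').length = (u ++ [c]).length + r'.length := by simp; omega
    have hcast : ((u ++ [c]).length : Int) = (u.length : Int) + 1 := by
      simp [List.length_append]
    have hassoc : (u ++ [c]) ++ r' = u ++ (c :: r') := by simp
    have hgetD_at : (u ++ c :: r').getD u.length ' ' = c := by
      rw [List.getD_append_right u (c :: r') ' ' u.length (le_refl _)]
      simp
    by_cases hk : k = c
    · subst hk
      simp only [BEq.rfl, if_true, Int.toNat_natCast]
      rw [pvSet_map_range, hN, ← hcast, ih]
      refine Prod.ext ?_ ?_
      · rw [← hN]
        apply pvMap_range_congr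
        intro p hp
        simp only [hassoc, List.length_append, List.length_cons, List.length_nil]
        by_cases hp1 : p < u.length
        · have c1 : ¬ ((u ++ k :: r').getD p ' ' = k ∧ u.length + (0 + 1) ≤ p) := by
            rintro ⟨-, h⟩; omega
          have c2 : ¬ ((u ++ k :: r').getD p ' ' = k ∧ u.length ≤ p) := by
            rintro ⟨-, h⟩; omega
          have c3 : ¬ (p = u.length) := by omega
          rw [if_neg c1, if_neg c3, if_neg c2]
        · by_cases hp2 : p = u.length
          · have hg : (u ++ k :: r').getD p ' ' = k := by rw [hp2]; exact hgetD_at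
            have c1 : ¬ ((u ++ k :: r').getD p ' ' = k ∧ u.length + (0 + 1) ≤ p) := by
              rintro ⟨-, h⟩; omega
            have c2 : (u ++ k :: r').getD p ' ' = k ∧ u.length ≤ p := ⟨hg, by omega⟩
            rw [if_neg c1, if_pos hp2, if_pos c2]
            simp [hp2]
          · have hgt : u.length < p := by omega
            by_cases hc : (u ++ k :: r').getD p ' ' = k
            · have c1 : (u ++ k :: r').getD p ' ' = k ∧ u.length + (0 + 1) ≤ p := ⟨hc, by omega⟩
              have c2 : (u ++ k :: r').getD p ' ' = k ∧ u.length ≤ p := ⟨hc, by omega⟩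
              rw [if_pos c1, if_pos c2]
              have hsub : p - u.length = (p - (u.length + (0 + 1))) + 1 := by omega
              rw [hsub, List.take_succ_cons, List.count_cons_self]
              push_cast; ring_nf
            · have c1 : ¬ ((u ++ k :: r').getD p ' ' = k ∧ u.length + (0 + 1) ≤ p) := by
                rintro ⟨h, -⟩; exact hc h
              have c2 : ¬ ((u ++ k :: r').getD p ' ' = k ∧ u.length ≤ p) := by
                rintro ⟨h, -⟩; exact hc h
              rw [if_neg c1, if_neg c2, if_neg hp2]
      · simp only [List.count_cons_self]
        push_cast; ring
    · have hbeq : ¬ ((k == c) = true) := by simp [hk]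
      rw [if_neg hbeq]
      rw [hN, ← hcast, ih]
      refine Prod.ext ?_ ?_
      · rw [← hN]
        apply pvMap_range_congr
        intro p hp
        simp only [hassoc, List.length_append, List.length_cons, List.length_nil]
        by_cases hp1 : u.length + (0 + 1) ≤ p
        · by_cases hc : (u ++ c :: r').getD p ' ' = k
          · have c1 : (u ++ c :: r').getD p ' ' = k ∧ u.length + (0 + 1) ≤ p := ⟨hc, hp1⟩
            have c2 : (u ++ c :: r').getD p ' ' = k ∧ u.length ≤ p := ⟨hc, by omega⟩
            rw [if_pos c1, if_pos c2]
            have hsub : p - u.length = (p - (u.length + (0 + 1))) + 1 := by omega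
            rw [hsub, List.take_succ_cons, List.count_cons_of_ne (Ne.symm hk)]
          · have c1 : ¬ ((u ++ c :: r').getD p ' ' = k ∧ u.length + (0 + 1) ≤ p) := by
              rintro ⟨h, -⟩; exact hc h
            have c2 : ¬ ((u ++ c :: r').getD p ' ' = k ∧ u.length ≤ p) := by
              rintro ⟨h, -⟩; exact hc h
            rw [if_neg c1, if_neg c2]
        · by_cases hp2 : p = u.length
          · have c1 : ¬ ((u ++ c :: r').getD p ' ' = k ∧ u.length + (0 + 1) ≤ p) := by
              rintro ⟨-, h⟩; omega
            have c2 : ¬ ((u ++ c :: r').getD p ' ' = k ∧ u.length ≤ p) := by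
              rintro ⟨h, -⟩; rw [hp2, hgetD_at] at h; exact hk h.symm
            rw [if_neg c1, if_neg c2]
          · have c1 : ¬ ((u ++ c :: r').getD p ' ' = k ∧ u.length + (0 + 1) ≤ p) := by
              rintro ⟨-, h⟩; omega
            have c2 : ¬ ((u ++ c :: r').getD p ' ' = k ∧ u.length ≤ p) := by
              rintro ⟨-, h⟩; omega
            rw [if_neg c1, if_neg c2]
      · rw [List.count_cons_of_ne (Ne.symm hk)]

def pvCh (j : Nat) : Char := Char.ofNat (97 + j)
def pvCnt (w : List Char) (m : Nat) : Nat := w.countP (fun d => decide (97 ≤ d.toNat ∧ d.toNat < 97 + m))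
def pvOm (w : List Char) (m : Nat) : Int := 1 + (pvCnt w m : Int)
theorem pvCnt_zero (w : List Char) : pvCnt w 0 = 0 :=
  List.countP_eq_zero.mpr (by intro c _; simp only [decide_eq_true_eq, not_and, not_lt]; omega)
theorem pvRepl_getD (j : Nat) : (List.replicate 26 (0 : Int)).getD j 0 = 0 := by
  rw [List.getD_eq_getElem?_getD, List.getElem?_replicate]; split_ifs <;> rfl
def pvThr (w : List Char) (m : Nat) (p : Nat) : Option Int :=
  let c := w.getD p ' '
  if 97 ≤ c.toNat ∧ c.toNat < 97 + m then
    some (pvOm w (c.toNat - 97) + ((w.take p).count c : Int))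
  else none
theorem pvCh_toNat (j : Nat) (hj : j < 26) : (pvCh j).toNat = 97 + j := by
  unfold pvCh
  rw [Char.toNat_ofNat]
  have : (97 + j).isValidChar := Or.inl (by omega)
  simp [this]
theorem pvEq_ch_iff (c : Char) (j : Nat) (hj : j < 26) : c = pvCh j ↔ c.toNat = 97 + j := by
  constructor
  · rintro rfl; exact pvCh_toNat j hj
  · intro h
    have := Char.ofNat_toNat c
    rw [h] at this; exact this.symm
theorem pvCnt_succ (w : List Char) (m : Nat) (hm : m < 26) :
    pvCnt w (m + 1) = pvCnt w m + w.count (pvCh m) := by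
  induction w with
  | nil => simp [pvCnt]
  | cons c w ih =>
    simp only [pvCnt, List.countP_cons, List.count_cons] at ih ⊢
    have hbeq : (c == pvCh m) = decide (c.toNat = 97 + m) := by
      rw [Bool.eq_iff_iff]; simp [pvEq_ch_iff c m hm]
    rw [hbeq, ih]
    simp only [decide_eq_true_eq]
    by_cases h1 : 97 ≤ c.toNat ∧ c.toNat < 97 + m
    · have h2 : 97 ≤ c.toNat ∧ c.toNat < 97 + (m+1) := by omega
      have h3 : ¬ (c.toNat = 97 + m) := by omega
      simp [h1, h2, h3]; omega
    · by_cases h2 : c.toNat = 97 + m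
      · have h3 : 97 ≤ c.toNat ∧ c.toNat < 97 + (m+1) := by omega
        simp [h2]; omega
      · have h3 : ¬ (97 ≤ c.toNat ∧ c.toNat < 97 + (m+1)) := by omega
        simp [h1, h2, h3]

theorem pvA_inner0 (k : Char) (w : List Char) (g : Nat → Option Int) (o : Int) :
    (PySem.List.enumerate w 0).foldl
      (fun st pc => if k == pc.2 then (st.1.set pc.1.toNat (some st.2), st.2 + 1) else st)
      ((List.range w.length).map g, o)
    = ((List.range w.length).map (fun p =>
         if w.getD p ' ' = k then some (o + ((w.take p).count k : Int)) else g p),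
       o + (w.count k : Int)) := by
  have h := pvA_inner k w [] g o
  simpa using h

theorem pvA_outer (w : List Char) (t m : Nat) (hm : m + t = 26) :
    (PySem.List.pyRange (m : Int) 26 1).foldl
      (fun st i =>
        let k := Char.ofNat (i + 97).toNat
        (PySem.List.enumerate w 0).foldl
          (fun st pc => if k == pc.2 then (st.1.set pc.1.toNat (some st.2), st.2 + 1) else st) st)
      ((List.range w.length).map (pvThr w m), pvOm w m)
    = ((List.range w.length).map (pvThr w 26), pvOm w 26) := by
  induction t generalizing m with
  | zero =>
    have hm26 : m = 26 := by omega
    subst hm26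
    have hnil : PySem.List.pyRange ((26 : Nat) : Int) 26 1 = [] := by decide
    rw [hnil, List.foldl_nil]
  | succ t ih =>
    have hlt : (m : Int) < 26 := by omega
    have hm26 : m < 26 := by omega
    rw [PySem.List.pyRange_one_cons hlt, List.foldl_cons]
    have hk : Char.ofNat ((m : Int) + 97).toNat = pvCh m := by
      have h1 : ((m : Int) + 97).toNat = 97 + m := by omega
      rw [h1]; rfl
    simp only [hk]
    rw [pvA_inner0]
    have hst : ((List.range w.length).map (fun p =>
         if w.getD p ' ' = pvCh m then some (pvOm w m + ((w.take p).count (pvCh m) : Int)) else pvThr w m p),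
       pvOm w m + (w.count (pvCh m) : Int))
       = ((List.range w.length).map (pvThr w (m+1)), pvOm w (m+1)) := by
      refine Prod.ext ?_ ?_
      · apply pvMap_range_congr
        intro p hp
        by_cases h : w.getD p ' ' = pvCh m
        · have ht : (w.getD p ' ').toNat = 97 + m := (pvEq_ch_iff _ m hm26).mp h
          have hc : 97 ≤ (w.getD p ' ').toNat ∧ (w.getD p ' ').toNat < 97 + (m+1) := by omega
          simp only [pvThr, hc, if_pos h]
          rw [← h, ht]
          simp
        · have ht : (w.getD p ' ').toNat ≠ 97 + m := fun hh => h ((pvEq_ch_iff _ m hm26).mpr hh)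
          simp only [pvThr, if_neg h]
          split_ifs with h1 h2 h2 <;> try rfl
          · exact absurd (by omega : 97 ≤ (w.getD p ' ').toNat ∧ (w.getD p ' ').toNat < 97 + (m+1)) h2
          · exact absurd (by omega : 97 ≤ (w.getD p ' ').toNat ∧ (w.getD p ' ').toNat < 97 + m) h1
      · simp only [pvOm, pvCnt_succ w m hm26]
        push_cast; ring
    rw [hst]
    have hcast : (m : Int) + 1 = ((m + 1 : Nat) : Int) := by push_cast; ring
    rw [hcast]
    exact ih (m+1) (by omega)

theorem pvSet_getD (l : List Int) (i : Nat) (v : Int) (j : Nat) :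
    (l.set i v).getD j 0 = if j = i ∧ i < l.length then v else l.getD j 0 := by
  simp [List.getD_eq_getElem?_getD, List.getElem?_set]; split_ifs <;> simp_all

theorem pvB_counts_len (w : List Char) (acc : List Int) :
    (w.foldl (fun counts c =>
      let ci : Int := (c.toNat : Int) - 97
      if 0 ≤ ci ∧ ci < 26 then counts.set ci.toNat (counts.getD ci.toNat 0 + 1) else counts) acc).length
    = acc.length := by
  induction w generalizing acc with
  | nil => rfl
  | cons c w ih =>
    rw [List.foldl_cons, ih]
    show (if 0 ≤ (c.toNat : Int) - 97 ∧ (c.toNat : Int) - 97 < 26 then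
        acc.set ((c.toNat : Int) - 97).toNat (acc.getD ((c.toNat : Int) - 97).toNat 0 + 1) else acc).length = acc.length
    split_ifs <;> simp

theorem pvB_counts (w : List Char) (acc : List Int) (hl : acc.length = 26) (j : Nat) (hj : j < 26) :
    (w.foldl (fun counts c =>
      let ci : Int := (c.toNat : Int) - 97
      if 0 ≤ ci ∧ ci < 26 then counts.set ci.toNat (counts.getD ci.toNat 0 + 1) else counts) acc).getD j 0
    = acc.getD j 0 + (w.count (pvCh j) : Int) := by
  induction w generalizing acc with
  | nil => simp
  | cons c w ih =>
    rw [List.foldl_cons]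
    by_cases hlc : (0 ≤ (c.toNat : Int) - 97 ∧ (c.toNat : Int) - 97 < 26)
    · have hlow : 97 ≤ c.toNat ∧ c.toNat < 123 := by omega
      have hci : ((c.toNat : Int) - 97).toNat = c.toNat - 97 := by omega
      simp only [if_pos hlc, hci]
      rw [ih _ (by rw [List.length_set]; exact hl)]
      rw [pvSet_getD, hl]
      have hbeq : (c == pvCh j) = decide (c.toNat = 97 + j) := by
        rw [Bool.eq_iff_iff]; simp [pvEq_ch_iff c j hj]
      rw [List.count_cons, hbeq]
      by_cases he : j = c.toNat - 97
      · have h1 : j = c.toNat - 97 ∧ c.toNat - 97 < 26 := ⟨he, by omega⟩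
        have h2 : c.toNat = 97 + j := by omega
        rw [if_pos h1, if_pos (decide_eq_true h2), he]
        push_cast; ring
      · have h2 : ¬ (c.toNat = 97 + j) := by omega
        have hd2 : ¬ ((decide (c.toNat = 97 + j)) = true) := by simp [h2]
        rw [if_neg (fun hh => he hh.1), if_neg hd2]
        simp
    · simp only [if_neg hlc]
      rw [ih _ hl]
      have h2 : ¬ (c.toNat = 97 + j) := by omega
      have hbeq : (c == pvCh j) = decide (c.toNat = 97 + j) := by
        rw [Bool.eq_iff_iff]; simp [pvEq_ch_iff c j hj]
      rw [List.count_cons, hbeq]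
      simp [h2]

theorem pvB_off (w : List Char) (counts : List Int)
    (Hc : ∀ j, j < 26 → counts.getD j 0 = (w.count (pvCh j) : Int))
    (t m : Nat) (hm : m + t = 26) (nx : List Int) (hlen : nx.length = 26)
    (hnx : ∀ j, j < m → nx.getD j 0 = pvOm w j) :
    (((PySem.List.pyRange (m : Int) 26 1).foldl (fun st i =>
        (st.1.set i.toNat st.2, st.2 + counts.getD i.toNat 0)) (nx, pvOm w m)).1.length = 26)
    ∧ (∀ j, j < 26 → ((PySem.List.pyRange (m : Int) 26 1).foldl (fun st i =>
        (st.1.set i.toNat st.2, st.2 + counts.getD i.toNat 0)) (nx, pvOm w m)).1.getD j 0 = pvOm w j) := by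
  induction t generalizing m nx with
  | zero =>
    have hm26 : m = 26 := by omega
    subst hm26
    have hnil : PySem.List.pyRange ((26 : Nat) : Int) 26 1 = [] := by decide
    rw [hnil]
    exact ⟨hlen, fun j hj => hnx j (by omega)⟩
  | succ t ih =>
    have hlt : (m : Int) < 26 := by omega
    have hm26 : m < 26 := by omega
    rw [PySem.List.pyRange_one_cons hlt, List.foldl_cons]
    have htn : ((m : Int)).toNat = m := by omega
    simp only [htn]
    have hsnd : pvOm w m + counts.getD m 0 = pvOm w (m + 1) := by
      rw [Hc m hm26]
      simp only [pvOm, pvCnt_succ w m hm26]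
      push_cast; ring
    rw [hsnd]
    have hcast : (m : Int) + 1 = ((m + 1 : Nat) : Int) := by push_cast; ring
    rw [hcast]
    apply ih (m + 1) (by omega)
    · rw [List.length_set]; exact hlen
    · intro j hj
      rw [pvSet_getD, hlen]
      by_cases he : j = m
      · simp [he, hm26]
      · rw [if_neg (by tauto)]
        exact hnx j (by omega)

theorem pvB_final (r u w : List Char) (h : w = u ++ r) (nx : List Int) (hlen : nx.length = 26)
    (hnx : ∀ j, j < 26 → nx.getD j 0 = pvOm w j + (u.count (pvCh j) : Int))
    (out : List (Option Int)) (hout : out = (List.range u.length).map (pvThr w 26)) :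
    (r.foldl (fun st c =>
      let ci : Int := (c.toNat : Int) - 97
      if 0 ≤ ci ∧ ci < 26 then
        (st.1.set ci.toNat (st.1.getD ci.toNat 0 + 1), st.2 ++ [some (st.1.getD ci.toNat 0)])
      else (st.1, st.2 ++ [none])) (nx, out)).2
    = (List.range w.length).map (pvThr w 26) := by
  induction r generalizing u nx out with
  | nil =>
    rw [List.foldl_nil, hout, h]
    simp
  | cons c r' ih =>
    rw [List.foldl_cons]
    have hw' : w = (u ++ [c]) ++ r' := by rw [h]; simp
    have hgetD_at : w.getD u.length ' ' = c := by
      rw [h, List.getD_append_right u (c :: r') ' ' u.length (le_refl _)]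
      simp
    have htake : w.take u.length = u := by
      rw [h, List.take_left]
    by_cases hlc : (0 ≤ (c.toNat : Int) - 97 ∧ (c.toNat : Int) - 97 < 26)
    · have hlow : 97 ≤ c.toNat ∧ c.toNat < 123 := by omega
      have hci : ((c.toNat : Int) - 97).toNat = c.toNat - 97 := by omega
      have hcc : c = pvCh (c.toNat - 97) := by
        rw [pvEq_ch_iff c (c.toNat - 97) (by omega)]; omega
      simp only [if_pos hlc, hci]
      apply ih (u ++ [c]) hw' _ (by rw [List.length_set]; exact hlen)
      · intro j hj
        rw [pvSet_getD, hlen]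
        have hbeq : (c == pvCh j) = decide (c.toNat = 97 + j) := by
          rw [Bool.eq_iff_iff]; simp [pvEq_ch_iff c j hj]
        rw [List.count_append, List.count_cons, List.count_nil, hbeq]
        by_cases he : j = c.toNat - 97
        · have h2 : c.toNat = 97 + j := by omega
          rw [if_pos ⟨he, by omega⟩, if_pos (decide_eq_true h2), ← he, hnx j hj]
          push_cast; ring
        · have h2 : ¬ (c.toNat = 97 + j) := by omega
          have hd2 : ¬ ((decide (c.toNat = 97 + j)) = true) := by simp [h2]
          rw [if_neg (fun hh => he hh.1), if_neg hd2, hnx j hj]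
          simp
      · have hval : pvThr w 26 u.length = some (nx.getD (c.toNat - 97) 0) := by
          rw [hnx (c.toNat - 97) (by omega)]
          simp only [pvThr, hgetD_at]
          rw [if_pos (by omega : 97 ≤ c.toNat ∧ c.toNat < 97 + 26), htake]
          rw [← hcc]
        rw [hout, List.length_append, List.length_cons, List.length_nil, List.range_succ,
          List.map_append, List.map_cons, List.map_nil, hval]
    · simp only [if_neg hlc]
      apply ih (u ++ [c]) hw' nx hlen
      · intro j hj
        have h2 : ¬ (c.toNat = 97 + j) := by omega
        have hbeq : (c == pvCh j) = decide (c.toNat = 97 + j) := by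
          rw [Bool.eq_iff_iff]; simp [pvEq_ch_iff c j hj]
        have hd2 : ¬ ((decide (c.toNat = 97 + j)) = true) := by simp [h2]
        rw [List.count_append, List.count_cons, List.count_nil, hbeq, if_neg hd2, hnx j hj]
        simp
      · have hval : pvThr w 26 u.length = none := by
          simp only [pvThr, hgetD_at]
          rw [if_neg (by omega : ¬ (97 ≤ c.toNat ∧ c.toNat < 97 + 26))]
        rw [hout, List.length_append, List.length_cons, List.length_nil, List.range_succ,
          List.map_append, List.map_cons, List.map_nil, hval]


theorem pvA_eq (word : String) :
    alphabetize_codeword word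
      = (List.range word.toList.length).map (pvThr word.toList 26) := by
  have hstate : (List.replicate word.toList.length (none : Option Int), (1 : Int))
      = ((List.range word.toList.length).map (pvThr word.toList 0), pvOm word.toList 0) := by
    refine Prod.ext ?_ ?_
    · have h1 : (List.range word.toList.length).map (pvThr word.toList 0)
          = (List.range word.toList.length).map (fun _ => (none : Option Int)) :=
        pvMap_range_congr _ _ _ (fun p hp => by simp only [pvThr]; rw [if_neg (by omega)])
      rw [h1]
      simp
    · simp [pvOm, pvCnt_zero]
  show ((PySem.List.pyRange 0 26 1).foldl (fun st i =>
      let k := Char.ofNat (i + 97).toNat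
      (PySem.List.enumerate word.toList 0).foldl
        (fun st pc => if k == pc.2 then (st.1.set pc.1.toNat (some st.2), st.2 + 1) else st) st)
    (List.replicate word.toList.length (none : Option Int), (1 : Int))).1 = _
  rw [hstate]
  exact congrArg Prod.fst (pvA_outer word.toList 26 0 rfl)

theorem pvB_eq (word : String) :
    alphabetize_codeword_alt word
      = (List.range word.toList.length).map (pvThr word.toList 26) := by
  have hcLen : (word.toList.foldl (fun counts c =>
      let ci : Int := (c.toNat : Int) - 97
      if 0 ≤ ci ∧ ci < 26 then counts.set ci.toNat (counts.getD ci.toNat 0 + 1) else counts)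
      (List.replicate 26 (0 : Int))).length = 26 := by
    rw [pvB_counts_len]; simp
  have Hc : ∀ j, j < 26 → (word.toList.foldl (fun counts c =>
      let ci : Int := (c.toNat : Int) - 97
      if 0 ≤ ci ∧ ci < 26 then counts.set ci.toNat (counts.getD ci.toNat 0 + 1) else counts)
      (List.replicate 26 (0 : Int))).getD j 0 = (word.toList.count (pvCh j) : Int) := by
    intro j hj
    rw [pvB_counts word.toList _ (by simp) j hj, pvRepl_getD]
    exact zero_add _
  have hoff := pvB_off word.toList _ Hc 26 0 rfl (List.replicate 26 (0 : Int)) (by simp)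
    (fun j hj => absurd hj (by omega))
  simp only [Nat.cast_zero] at hoff
  obtain ⟨hlen', hgetD'⟩ := hoff
  have hfin := pvB_final word.toList [] word.toList (List.nil_append word.toList).symm _ hlen'
    (fun j hj => by rw [hgetD' j hj]; simp) [] (by simp)
  show (word.toList.foldl (fun st c =>
      let ci : Int := (c.toNat : Int) - 97
      if 0 ≤ ci ∧ ci < 26 then
        (st.1.set ci.toNat (st.1.getD ci.toNat 0 + 1), st.2 ++ [some (st.1.getD ci.toNat 0)])
      else (st.1, st.2 ++ [none]))
    ((((PySem.List.pyRange 0 26 1).foldl (fun st i =>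
      (st.1.set i.toNat st.2, st.2 + (word.toList.foldl (fun counts c =>
        let ci : Int := (c.toNat : Int) - 97
        if 0 ≤ ci ∧ ci < 26 then counts.set ci.toNat (counts.getD ci.toNat 0 + 1) else counts)
        (List.replicate 26 (0 : Int))).getD i.toNat 0))
      (List.replicate 26 (0 : Int), (1 : Int))).1), ([] : List (Option Int)))).2 = _
  have h1 : (List.replicate 26 (0 : Int), (1 : Int))
      = (List.replicate 26 (0 : Int), pvOm word.toList 0) := by
    rw [Prod.mk.injEq]
    exact ⟨rfl, by simp [pvOm, pvCnt_zero]⟩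
  rw [h1]
  exact hfin

-- ===== VERDICT (by name: the statement is the Claim_ definition above) =====
theorem alphabetize_codeword_spec : Claim_equal_alphabetize_codeword := by
  intro word _
  unfold Spec_alphabetize_codeword
  rw [pvA_eq, pvB_eq]
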